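-- pv_equiv track=rewrite | github.com/MuzzammilN/Cryptography | hexidecimal_base64.py | BinaryToSixBit
-- ===== SOURCE A (Python) =====
-- def Padding(binary: str) -> str:
--     try:
--         while(len(binary) % 6):
--             binary += "0"
--         return binary
--     except Exception as e:
--         f"an exception has occurred {e}"
--
-- def BinaryToSixBit(binary: str) -> list:
--     try:
--         if not all(bit in "01" for bit in binary):
--             return "Error: binary string contains invalid bits"
--         binary = Padding(binary)
--         chunks = []
--
--         for i in range(0, len(binary), 6): ## iterates, 0 -> 6 -> 12 -> 18
--             chunks.append(binary[i:i+6]) ## string slice from 0 -> 6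
--         return chunks
--
--     except Exception as e:
--         return f"an exception has occurred {e}"
-- ===== SOURCE B (Python) =====
-- def BinaryToSixBit(binary: str) -> list:
--     if any(bit not in "01" for bit in binary):
--         return "Error: binary string contains invalid bits"
--     chunks = []
--     rest = binary
--     while rest:
--         head, rest = rest[:6], rest[6:]
--         chunks.append(head.ljust(6, "0"))
--     return chunks
-- ===== Notes on version B (the rewrite author's own statement) =====
-- stated objective: simpler
-- what changed: B drops the separate while-loop Padding pass and the index-based range(0,len,6) slicing; it consumes the string head/tail (rest[:6]/rest[6:]) in one loop, left-justifying each chunk with '0' inline, so the fully padded string is never built.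
import Mathlib
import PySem

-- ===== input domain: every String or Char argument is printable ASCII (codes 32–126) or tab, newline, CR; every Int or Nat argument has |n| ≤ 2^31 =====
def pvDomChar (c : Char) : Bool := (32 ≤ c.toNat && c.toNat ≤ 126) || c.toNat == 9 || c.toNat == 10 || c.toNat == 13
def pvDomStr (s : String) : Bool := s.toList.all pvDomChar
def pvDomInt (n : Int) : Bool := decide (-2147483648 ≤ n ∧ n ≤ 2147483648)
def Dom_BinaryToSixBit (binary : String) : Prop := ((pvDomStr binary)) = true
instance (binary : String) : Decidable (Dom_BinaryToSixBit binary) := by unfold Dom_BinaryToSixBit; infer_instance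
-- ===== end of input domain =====

-- B rewrites pad-then-index-chunk as a single head/tail consumption loop that left-justifies
-- each chunk inline (objective: simpler, no pre-padding pass); equivalent on valid binary strings.

-- ===== PORT A =====
-- Padding: while len(binary) % 6: binary += "0" — fuel 6 only makes the while-loop total
-- (at most 5 zeros are ever appended; the loop body and test are unchanged).
def PaddingGo (fuel : Nat) (l : List Char) : List Char :=
  match fuel with
  | 0 => l
  | fuel + 1 => if l.length % 6 ≠ 0 then PaddingGo fuel (l ++ ['0']) else l

def PaddingA (l : List Char) : List Char := PaddingGo 6 l

def BinaryToSixBit (binary : String) : List String :=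
  if ¬ (binary.toList.all (fun bit => bit == '0' || bit == '1')) then
    -- Python returns the error STRING here (not a list); these inputs are excluded by Pre_
    []
  else
    let padded := PaddingA binary.toList
    (PySem.List.pyRange 0 (padded.length : Int) 6).foldl
      (fun chunks i =>
        chunks ++ [String.ofList (PySem.List.slice padded (some i) (some (i + 6)))]) []

-- ===== PORT B =====
-- while rest: head, rest = rest[:6], rest[6:]; chunks.append(head.ljust(6, '0'))
-- fuel = length of the remaining string only makes the while-loop total ('rest' shrinks each turn).
def chunksGo (fuel : Nat) (l : List Char) : List String :=
  match fuel with
  | 0 => []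
  | fuel + 1 =>
    if l = [] then []
    else
      let head := l.take 6
      String.ofList (head ++ List.replicate (6 - head.length) '0') :: chunksGo fuel (l.drop 6)

def chunksAlt (l : List Char) : List String := chunksGo l.length l

def BinaryToSixBit_alt (binary : String) : List String :=
  if binary.toList.any (fun bit => ¬ (bit == '0' || bit == '1')) then
    -- Python returns the error STRING here (not a list); these inputs are excluded by Pre_
    []
  else chunksAlt binary.toList

-- ===== PRECONDITION & SPEC =====
-- Pre_ excludes strings containing a character other than '0'/'1': there Python A (and B)
-- return an error *string*, not a list of the declared return type.
def Pre_BinaryToSixBit (binary : String) : Prop :=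
  binary.toList.all (fun bit => bit == '0' || bit == '1') = true
instance (binary : String) : Decidable (Pre_BinaryToSixBit binary) := by
  unfold Pre_BinaryToSixBit; infer_instance

def pvWitness_BinaryToSixBit : String := "1010101"

def Spec_BinaryToSixBit (binary : String) (out : List String) : Prop := out = BinaryToSixBit_alt binary
instance (binary : String) (out : List String) : Decidable (Spec_BinaryToSixBit binary out) := by unfold Spec_BinaryToSixBit; infer_instance

-- ===== CLAIM (what is proved, stated in full; the proofs are below) =====
def Claim_equal_BinaryToSixBit : Prop := ∀ (binary : String), Dom_BinaryToSixBit binary → Pre_BinaryToSixBit binary → Spec_BinaryToSixBit binary (BinaryToSixBit binary)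

-- ===== LEMMAS AND PROOFS =====

-- proof-side exact chunker (A's fold, rephrased as a map over chunk indices)
def chunkMap (p : List Char) : List String :=
  (List.range (p.length / 6)).map (fun k => String.ofList ((p.drop (6 * k)).take 6))

lemma hrep_zero (n : Nat) (hn : n ≠ 0) :
    (['0'] : List Char) ++ List.replicate (n - 1) '0' = List.replicate n '0' := by
  obtain ⟨p, rfl⟩ := Nat.exists_eq_succ_of_ne_zero hn
  simp [List.replicate_succ]

lemma PaddingGo_eq (fuel : Nat) : ∀ (l : List Char), (6 - l.length % 6) % 6 ≤ fuel →
    PaddingGo fuel l = l ++ List.replicate ((6 - l.length % 6) % 6) '0' := by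
  induction fuel with
  | zero =>
      intro l h
      have h0 : (6 - l.length % 6) % 6 = 0 := by omega
      simp [PaddingGo, h0]
  | succ fuel ih =>
      intro l h
      by_cases hm : l.length % 6 = 0
      · simp [PaddingGo, hm]
      · have hstep : PaddingGo (fuel + 1) l = PaddingGo fuel (l ++ ['0']) := by
          simp [PaddingGo, hm]
        have h2 : (6 - (l ++ ['0']).length % 6) % 6 = (6 - l.length % 6) % 6 - 1 := by
          simp only [List.length_append, List.length_cons, List.length_nil]; omega
        rw [hstep, ih (l ++ ['0']) (by omega), h2, List.append_assoc,
          hrep_zero _ (by omega)]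

lemma PaddingA_eq (l : List Char) :
    PaddingA l = l ++ List.replicate ((6 - l.length % 6) % 6) '0' :=
  PaddingGo_eq 6 l (by omega)

lemma chunksGo_irrel : ∀ (f1 : Nat), ∀ (f2 : Nat) (l : List Char),
    l.length ≤ f1 → l.length ≤ f2 → chunksGo f1 l = chunksGo f2 l := by
  intro f1
  induction f1 using Nat.strong_induction_on with
  | _ f1 ih =>
  intro f2 l h1 h2
  by_cases hl : l = []
  · subst hl
    cases f1 <;> cases f2 <;> simp [chunksGo]
  · have hpos : 0 < l.length := List.length_pos_of_ne_nil hl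
    obtain ⟨g1, rfl⟩ : ∃ g, f1 = g + 1 := ⟨f1 - 1, by omega⟩
    obtain ⟨g2, rfl⟩ : ∃ g, f2 = g + 1 := ⟨f2 - 1, by omega⟩
    simp only [chunksGo, hl, if_false]
    congr 1
    exact ih g1 (by omega) g2 (l.drop 6) (by simp [List.length_drop]; omega)
      (by simp [List.length_drop]; omega)

lemma chunksAlt_unfold (l : List Char) :
    chunksAlt l = if l = [] then []
      else String.ofList (l.take 6 ++ List.replicate (6 - (l.take 6).length) '0')
        :: chunksAlt (l.drop 6) := by
  by_cases hl : l = []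
  · subst hl; simp [chunksAlt, chunksGo]
  · have hpos : 0 < l.length := List.length_pos_of_ne_nil hl
    unfold chunksAlt
    obtain ⟨g, hg⟩ : ∃ g, l.length = g + 1 := ⟨l.length - 1, by omega⟩
    rw [hg]
    simp only [chunksGo, hl, if_false]
    congr 1
    exact chunksGo_irrel g _ (l.drop 6) (by simp [List.length_drop]; omega)
      (le_refl _)

lemma fold_eq_chunkMap (p : List Char) (h : p.length % 6 = 0) :
    (PySem.List.pyRange 0 (p.length : Int) 6).foldl
      (fun chunks i =>
        chunks ++ [String.ofList (PySem.List.slice p (some i) (some (i + 6)))]) []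
    = chunkMap p := by
  rw [PySem.List.foldl_append_singleton_eq_map, List.nil_append]
  rw [PySem.List.pyRange_of_pos 0 (p.length : Int) (by norm_num)]
  obtain ⟨m, hm⟩ : ∃ m, p.length = 6 * m := ⟨p.length / 6, by omega⟩
  have hcnt : (if (0:Int) < (p.length : Int) then
      (((p.length : Int) - 0 + 6 - 1) / 6).toNat else 0) = m := by
    split
    · rw [hm]; push_cast
      have : ((6 * (m:Int) + 6 - 1 - 0) / 6) = m := by omega
      omega
    · rename_i hc; omega
  rw [hcnt, List.map_map]
  unfold chunkMap
  rw [hm, Nat.mul_div_cancel_left _ (by norm_num)]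
  apply List.map_congr_left
  intro k _
  simp only [Function.comp]
  have h1 : (0 : Int) + 6 * (k : Int) = ((6 * k : ℕ) : Int) := by push_cast; ring
  have h2 : (0 : Int) + 6 * (k : Int) + 6 = ((6 * k : ℕ) : Int) + ((6:ℕ) : Int) := by
    push_cast; ring
  rw [h1] at h2 ⊢
  rw [h2, PySem.List.slice_natCast_add]

lemma chunkMap_pad_eq_chunksAlt (l : List Char) :
    chunkMap (PaddingA l) = chunksAlt l := by
  induction hn : l.length using Nat.strong_induction_on generalizing l with
  | _ n ih =>
  by_cases hl : l = []
  · subst hl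
    simp [PaddingA_eq, chunkMap, chunksAlt, chunksGo]
  · rw [chunksAlt_unfold]
    simp only [hl, if_false]
    rw [PaddingA_eq]
    set k := (6 - l.length % 6) % 6 with hk
    have hlen : (l ++ List.replicate k '0').length = l.length + k := by simp
    have hlpos : 0 < l.length := List.length_pos_of_ne_nil hl
    have hmul : (l.length + k) % 6 = 0 := by omega
    obtain ⟨m, hm⟩ : ∃ m, l.length + k = 6 * m := ⟨(l.length + k) / 6, by omega⟩
    have hm1 : 1 ≤ m := by omega
    unfold chunkMap
    rw [hlen, hm, Nat.mul_div_cancel_left _ (by norm_num)]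
    obtain ⟨m', rfl⟩ : ∃ m', m = m' + 1 := ⟨m - 1, by omega⟩
    rw [List.range_succ_eq_map, List.map_cons, List.map_map]
    congr 1
    · -- head chunk
      simp only [Nat.mul_zero, List.drop_zero]
      by_cases h6 : 6 ≤ l.length
      · have : k < 6 := by omega
        have htake : (l ++ List.replicate k '0').take 6 = l.take 6 := by
          rw [List.take_append_of_le_length h6]
        rw [htake]
        have : (l.take 6).length = 6 := by rw [List.length_take]; omega
        rw [this]; simp
      · -- l.length < 6 : whole padded list is one chunk
        have hlk : l.length + k = 6 := by omega
        have : (l ++ List.replicate k '0').take 6 = l ++ List.replicate k '0' := by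
          apply List.take_of_length_le; omega
        rw [this]
        have ht : l.take 6 = l := List.take_of_length_le (by omega)
        have hk6 : k = 6 - l.length := by omega
        rw [ht, hk6]
    · -- tail chunks
      by_cases h6 : 6 ≤ l.length
      · have hdrop : (l ++ List.replicate k '0').drop 6 = l.drop 6 ++ List.replicate k '0' := by
          rw [List.drop_append_of_le_length h6]
        have hk' : k = (6 - (l.drop 6).length % 6) % 6 := by
          rw [List.length_drop]; omega
        have hrec : l.drop 6 ++ List.replicate k '0' = PaddingA (l.drop 6) := by
          rw [PaddingA_eq, ← hk']
        have ihr := ih (l.drop 6).length (by rw [List.length_drop]; omega) (l.drop 6) rfl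
        rw [← ihr]
        unfold chunkMap
        have hlen' : (PaddingA (l.drop 6)).length = 6 * m' := by
          rw [← hrec]; simp only [List.length_append, List.length_drop,
            List.length_replicate]; omega
        rw [hlen', Nat.mul_div_cancel_left _ (by norm_num)]
        apply List.map_congr_left
        intro j _
        simp only [Function.comp]
        rw [← hrec, ← hdrop]
        congr 2
        rw [List.drop_drop]
        congr 1
        omega
      · -- l.length < 6 : tail is empty on both sides
        have hm0 : m' = 0 := by omega
        have hd : l.drop 6 = [] := by
          apply List.drop_eq_nil_of_le; omega
        rw [hm0, hd]
        simp [chunksAlt, chunksGo]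

-- ===== VERDICT (by name: the statement is the Claim_ definition above) =====
theorem BinaryToSixBit_spec : Claim_equal_BinaryToSixBit := by
  intro binary _ hpre
  unfold Spec_BinaryToSixBit BinaryToSixBit BinaryToSixBit_alt
  unfold Pre_BinaryToSixBit at hpre
  have hany : binary.toList.any (fun bit => ¬ (bit == '0' || bit == '1')) = false := by
    rw [List.any_eq_false]
    intro c hc
    have := List.all_eq_true.mp hpre c hc
    simp [this]
  rw [hpre, hany]
  simp only [not_true, if_false, if_neg (by simp : ¬ (false = true))]
  rw [fold_eq_chunkMap _ (by
    rw [PaddingA_eq]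
    simp only [List.length_append, List.length_replicate]
    omega)]
  exact chunkMap_pad_eq_chunksAlt binary.toList
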